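-- pv_equiv track=rewrite | github.com/FabioErnestoMendes/bioinf_portfolio | bioinf/blast.py | busca_pares
-- ===== SOURCE A (Python) =====
-- from collections import defaultdict
--
-- def novo_indice(sequencia, k=3):
--     """
--     Cria um índice de k-mers (substrings de tamanho k) de uma sequência.
--
--     O índice devolve, para cada k-mer, a lista das posições (0-based) onde esse
--     k-mer começa na sequência.
--
--     Args:
--         sequencia (str): Sequência (por exemplo, DNA/proteína) onde será criado o índice.
--         k (int, optional): Tamanho do k-mer. Tem de ser > 0. Por omissão é 3.
--
--     Returns:
--         collections.defaultdict[list[int]]: Dicionário (defaultdict) que mapeia cada k-mer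
--         para uma lista de posições onde ocorre.
--
--     Raises:
--         ValueError: Se `k` for menor ou igual a 0.
--
--     Example:
--         >>> dict(novo_indice("ATAT", k=2))
--         {'AT': [0, 2], 'TA': [1]}
--     """
--
--     if k <= 0:  #Verificar se k menor que zero. Caso não parar.
--         raise ValueError("k tem de ser > 0")
--     indice = defaultdict(list)
--     for i in range(len(sequencia) - k + 1):
--         indice[sequencia[i:i+k]].append(i)
--     return indice
--
-- def busca_pares(query, subject, k=3):   #Função para encontramos os hits
--     """
--     Encontra todos os hits (seeds) entre `query` e `subject` com base em k-mers.
--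
--     Um hit é um par (i, j) onde:
--     - `i` é a posição inicial do k-mer na `query`
--     - `j` é a posição inicial do mesmo k-mer no `subject`
--
--     Args:
--         query (str): Sequência query (onde é construído o índice de k-mers).
--         subject (str): Sequência subject (onde são procurados os k-mers).
--         k (int, optional): Tamanho do k-mer (seed). Por omissão é 3.
--
--     Returns:
--         list[tuple[int, int]]: Lista de pares (i, j) com todos os hits encontrados.
--
--     Example:
--         >>> busca_pares("ATAT", "GATAT", k=2)
--         [(0, 1), (2, 1), (1, 2), (0, 3), (2, 3)]
--     """
--
--     indice = novo_indice(query, k)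
--     pares = []      #Guardar todos os hits como pares de coordenadas
--     for j in range(len(subject) - k + 1):       #Garantir que a ultima sbstring tem k comrpimento
--         seccao = subject[j:j+k]
--         for i in indice.get(seccao, ()):
--             pares.append((i, j))
--     return pares
-- ===== SOURCE B (Python) =====
-- def busca_pares(query, subject, k=3):
--     # Direct nested scan comparing slices; no k-mer index dict is built.
--     if k <= 0:
--         raise ValueError("k tem de ser > 0")
--     pares = []
--     for j in range(len(subject) - k + 1):
--         seccao = subject[j:j+k]
--         for i in range(len(query) - k + 1):
--             if query[i:i+k] == seccao:
--                 pares.append((i, j))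
--     return pares
-- ===== Notes on version B (the rewrite author's own statement) =====
-- stated objective: simpler
-- what changed: Replaces the defaultdict k-mer index with a direct nested scan that compares query[i:i+k] == subject[j:j+k] and appends (i, j), producing the same pairs in the same order without any dict.
import Mathlib
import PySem

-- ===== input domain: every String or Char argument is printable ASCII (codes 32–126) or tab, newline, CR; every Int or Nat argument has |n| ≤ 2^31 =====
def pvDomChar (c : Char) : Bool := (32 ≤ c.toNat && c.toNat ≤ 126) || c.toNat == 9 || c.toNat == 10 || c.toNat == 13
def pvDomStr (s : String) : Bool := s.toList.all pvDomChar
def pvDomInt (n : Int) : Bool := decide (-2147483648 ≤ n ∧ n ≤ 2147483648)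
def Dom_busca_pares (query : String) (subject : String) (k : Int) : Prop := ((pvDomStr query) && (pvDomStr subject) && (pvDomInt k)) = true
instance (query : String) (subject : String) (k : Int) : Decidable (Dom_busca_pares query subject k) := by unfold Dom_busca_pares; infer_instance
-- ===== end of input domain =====

-- B replaces A's defaultdict k-mer index with a direct nested slice-comparison scan; same pairs, same order.
-- Both Pythons raise ValueError when k <= 0; Pre_ excludes exactly those inputs.

-- ===== PORT A =====
-- novo_indice: builds the defaultdict k-mer index (string slices ported via toList; exact on the domain)
def novo_indice (sequencia : List Char) (k : Int) : PySem.Dict (List Char) (List Int) :=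
  (PySem.List.pyRange 0 ((sequencia.length : Int) - k + 1) 1).foldl
    (fun ind i => ind.modify (PySem.List.slice sequencia (some i) (some (i + k))) [] (fun l => l ++ [i]))
    PySem.Dict.empty

-- k ≤ 0 raises ValueError in Python: excluded by Pre_; the port returns [] there (value never claimed)
def busca_pares (query : String) (subject : String) (k : Int) : List (Int × Int) :=
  if k ≤ 0 then []
  else
    let indice := novo_indice query.toList k
    (PySem.List.pyRange 0 ((subject.toList.length : Int) - k + 1) 1).foldl
      (fun pares j =>
        let seccao := PySem.List.slice subject.toList (some j) (some (j + k))
        (indice.getD seccao []).foldl (fun pares i => pares ++ [(i, j)]) pares)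
      []

-- ===== PORT B =====
def busca_pares_alt (query : String) (subject : String) (k : Int) : List (Int × Int) :=
  if k ≤ 0 then []
  else
    (PySem.List.pyRange 0 ((subject.toList.length : Int) - k + 1) 1).foldl
      (fun pares j =>
        let seccao := PySem.List.slice subject.toList (some j) (some (j + k))
        (PySem.List.pyRange 0 ((query.toList.length : Int) - k + 1) 1).foldl
          (fun pares i =>
            if PySem.List.slice query.toList (some i) (some (i + k)) == seccao then pares ++ [(i, j)]
            else pares)
          pares)
      []

-- ===== PRECONDITION & SPEC =====
-- Pre_ excludes exactly k ≤ 0, where the Python A raises ValueError (B raises there too).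
def Pre_busca_pares (query : String) (subject : String) (k : Int) : Prop := 1 ≤ k
instance (query : String) (subject : String) (k : Int) : Decidable (Pre_busca_pares query subject k) := by unfold Pre_busca_pares; infer_instance
def pvWitness_busca_pares : String × String × Int := ("ATAT", "GATAT", 2)

def Spec_busca_pares (query : String) (subject : String) (k : Int) (out : List (Int × Int)) : Prop := out = busca_pares_alt query subject k
instance (query : String) (subject : String) (k : Int) (out : List (Int × Int)) : Decidable (Spec_busca_pares query subject k out) := by unfold Spec_busca_pares; infer_instance

-- ===== CLAIM (what is proved, stated in full; the proofs are below) =====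
def Claim_equal_busca_pares : Prop := ∀ (query : String) (subject : String) (k : Int), Dom_busca_pares query subject k → Pre_busca_pares query subject k → Spec_busca_pares query subject k (busca_pares query subject k)

-- ===== LEMMAS AND PROOFS =====

-- The index lookup returns exactly the positions i of the range whose k-mer equals w, in order.
theorem getD_foldl_modify_append (L : List Int) (f : Int → List Char)
    (d : PySem.Dict (List Char) (List Int)) (w : List Char) :
    (L.foldl (fun ind i => ind.modify (f i) [] (fun l => l ++ [i])) d).getD w []
      = d.getD w [] ++ (L.filter (fun i => f i == w)) := by
  induction L generalizing d with
  | nil => simp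
  | cons i L ih =>
    simp only [List.foldl_cons, List.filter_cons, ih]
    by_cases h : f i = w
    · subst h
      rw [PySem.Dict.getD_modify_self]
      simp
    · rw [PySem.Dict.getD_modify_of_ne _ _ _ (Ne.symm h)]
      simp [h]

theorem getD_novo_indice (q : List Char) (k : Int) (w : List Char) :
    (novo_indice q k).getD w []
      = (PySem.List.pyRange 0 ((q.length : Int) - k + 1) 1).filter
          (fun i => PySem.List.slice q (some i) (some (i + k)) == w) := by
  unfold novo_indice
  rw [getD_foldl_modify_append]
  simp

-- ===== VERDICT (by name: the statement is the Claim_ definition above) =====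
theorem busca_pares_spec : Claim_equal_busca_pares := by
  intro query subject k _ hk
  unfold Pre_busca_pares at hk
  unfold Spec_busca_pares busca_pares busca_pares_alt
  have hk' : ¬ k ≤ 0 := by omega
  simp only [hk', if_false]
  apply PySem.List.foldl_congr_mem
  intro pares j _
  rw [getD_novo_indice, PySem.List.foldl_append_singleton_eq_map,
      PySem.List.foldl_append_if]
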